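-- pv_equiv track=rewrite | github.com/Matti88/WDIS | Conf_Calculator.py | ConfigurationBoundleString
-- ===== SOURCE A (Python) =====
-- def ConfigurationBoundleString(list_of_items):
--     '''
--     Utility Function:
--     '''
--     exit_string = ''
--     for elem_pos in range(len(list_of_items)):
--         if (elem_pos + 1)%2 == 0:
--             exit_string = exit_string + '~' + str(list_of_items[elem_pos])
--         else:
--             exit_string = exit_string + ',' + str(list_of_items[elem_pos])
--
--     return exit_string[1:]
-- ===== SOURCE B (Python) =====
-- def ConfigurationBoundleString(list_of_items):
--     '''
--     Utility Function:
--     '''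
--     chunks = [list_of_items[i:i + 2] for i in range(0, len(list_of_items), 2)]
--     return ','.join('~'.join(str(x) for x in chunk) for chunk in chunks)
-- ===== Notes on version B (the rewrite author's own statement) =====
-- stated objective: faster
-- what changed: Replaces the index loop that prepends an alternating separator before each element via repeated string concatenation and then strips the first character, by chunking the list into pairs and building the result with two-level str.join (no strip step).
import Mathlib
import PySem

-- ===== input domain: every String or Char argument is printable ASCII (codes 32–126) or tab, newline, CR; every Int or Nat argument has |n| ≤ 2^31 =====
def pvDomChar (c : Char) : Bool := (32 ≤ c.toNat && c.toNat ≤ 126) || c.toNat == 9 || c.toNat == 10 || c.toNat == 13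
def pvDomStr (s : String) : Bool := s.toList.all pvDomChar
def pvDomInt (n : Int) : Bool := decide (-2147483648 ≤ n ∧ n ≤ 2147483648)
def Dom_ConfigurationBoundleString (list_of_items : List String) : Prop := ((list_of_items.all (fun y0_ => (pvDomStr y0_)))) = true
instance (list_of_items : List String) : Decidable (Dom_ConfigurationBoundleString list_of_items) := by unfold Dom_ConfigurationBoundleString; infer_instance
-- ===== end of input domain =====

-- B replaces A's index loop (alternating separator prepended before each element, first char stripped
-- at the end) by chunking the list into pairs and joining: '~' inside each pair, ',' between pairs.

-- ===== PORT A =====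
def ConfigurationBoundleString (list_of_items : List String) : String :=
  -- for elem_pos in range(len(list_of_items)): …  (indexing is always in range, so pyGetD is exact)
  let exit_string :=
    (PySem.List.pyRange 0 (PySem.List.len list_of_items) 1).foldl
      (fun acc elem_pos =>
        if PySem.Int.mod (elem_pos + 1) 2 == 0 then
          acc ++ "~" ++ PySem.List.pyGetD list_of_items elem_pos ""
        else
          acc ++ "," ++ PySem.List.pyGetD list_of_items elem_pos "") ""
  PySem.Str.slice exit_string (some 1) none

-- ===== PORT B =====
def ConfigurationBoundleString_alt (list_of_items : List String) : String :=
  -- chunks = [list_of_items[i:i+2] for i in range(0, len(list_of_items), 2)]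
  let chunks :=
    (PySem.List.pyRange 0 (PySem.List.len list_of_items) 2).map
      (fun i => PySem.List.slice list_of_items (some i) (some (i + 2)))
  PySem.Str.join "," (chunks.map (fun chunk => PySem.Str.join "~" chunk))

-- ===== PRECONDITION & SPEC =====
def Spec_ConfigurationBoundleString (list_of_items : List String) (out : String) : Prop := out = ConfigurationBoundleString_alt list_of_items
instance (list_of_items : List String) (out : String) : Decidable (Spec_ConfigurationBoundleString list_of_items out) := by unfold Spec_ConfigurationBoundleString; infer_instance

-- ===== CLAIM (what is proved, stated in full; the proofs are below) =====
def Claim_equal_ConfigurationBoundleString : Prop := ∀ (list_of_items : List String), Dom_ConfigurationBoundleString list_of_items → Spec_ConfigurationBoundleString list_of_items (ConfigurationBoundleString list_of_items)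

-- ===== LEMMAS AND PROOFS =====

-- Character sequence built by A's loop: a flag says whether the next separator is '~' (true) or ',' (false).
def pvPat : Bool → List String → List Char
  | _, [] => []
  | false, a :: rest => ',' :: (a.toList ++ pvPat true rest)
  | true, a :: rest => '~' :: (a.toList ++ pvPat false rest)

-- two-at-a-time induction principle
theorem pvTwoStep {P : List String → Prop} (h0 : P []) (h1 : ∀ a, P [a])
    (h2 : ∀ a b rest, P rest → P (a :: b :: rest)) : ∀ xs, P xs
  | [] => h0
  | [a] => h1 a
  | a :: b :: rest => h2 a b rest (pvTwoStep h0 h1 h2 rest)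

theorem pvMod2 (s : Int) : PySem.Int.mod s 2 = 0 ∨ PySem.Int.mod s 2 = 1 := by
  unfold PySem.Int.mod; rw [Int.fmod_eq_emod]; simp; omega

theorem pvMod2_succ_zero (s : Int) (h : PySem.Int.mod s 2 = 1) : PySem.Int.mod (s + 1) 2 = 0 := by
  unfold PySem.Int.mod at *; rw [Int.fmod_eq_emod] at *; simp at *; omega

theorem pvMod2_succ_one (s : Int) (h : PySem.Int.mod s 2 = 0) : PySem.Int.mod (s + 1) 2 = 1 := by
  unfold PySem.Int.mod at *; rw [Int.fmod_eq_emod] at *; simp at *; omega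

theorem pvLoopA (xs : List String) : ∀ (s : Int) (acc : String),
    (PySem.List.enumerate xs s).foldl
      (fun acc p =>
        if PySem.Int.mod (p.1 + 1) 2 == 0 then acc ++ "~" ++ p.2 else acc ++ "," ++ p.2) acc
      = acc ++ String.ofList (pvPat (decide (PySem.Int.mod s 2 = 1)) xs) := by
  induction xs with
  | nil =>
    intro s acc
    apply String.ext
    simp [PySem.List.enumerate, pvPat]
  | cons a rest ih =>
    intro s acc
    rw [PySem.List.enumerate_cons, List.foldl_cons, ih (s + 1)]
    rcases pvMod2 s with h | h
    · have h1 := pvMod2_succ_one s h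
      simp only [h, h1]
      apply String.ext
      simp [pvPat, String.toList_append]
    · have h1 := pvMod2_succ_zero s h
      simp only [h, h1]
      apply String.ext
      simp [pvPat, String.toList_append]

theorem pvAChars (xs : List String) :
    (ConfigurationBoundleString xs).toList = (pvPat false xs).tail := by
  unfold ConfigurationBoundleString
  simp only
  rw [show (PySem.List.pyRange 0 (PySem.List.len xs) 1).foldl
        (fun acc elem_pos =>
          if PySem.Int.mod (elem_pos + 1) 2 == 0 then
            acc ++ "~" ++ PySem.List.pyGetD xs elem_pos ""
          else acc ++ "," ++ PySem.List.pyGetD xs elem_pos "") ""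
      = (PySem.List.enumerate xs 0).foldl
          (fun acc p =>
            if PySem.Int.mod (p.1 + 1) 2 == 0 then acc ++ "~" ++ p.2
            else acc ++ "," ++ p.2) "" from by
    rw [PySem.List.enumerate_eq_map_pyRange xs "", List.foldl_map]]
  rw [pvLoopA xs 0]
  norm_num
  simp [PySem.List.slice_from_one]

-- chunking of B: pair-chunks as structural recursion
def pvChunks : List String → List (List String)
  | [] => []
  | [a] => [[a]]
  | a :: b :: rest => [a, b] :: pvChunks rest

theorem pvChunks_eq (xs : List String) :
    (PySem.List.pyRange 0 (PySem.List.len xs) 2).map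
        (fun i => PySem.List.slice xs (some i) (some (i + 2)))
      = (List.range ((xs.length + 1) / 2)).map (fun k => (xs.drop (2 * k)).take 2) := by
  rw [PySem.List.pyRange_of_pos 0 (PySem.List.len xs) (by omega), List.map_map]
  have hn : (if (0:Int) < PySem.List.len xs then ((PySem.List.len xs - 0 + 2 - 1) / 2).toNat else 0)
      = (xs.length + 1) / 2 := by
    simp only [PySem.List.len]
    split_ifs with h
    · have h1 : ((xs.length:Int) - 0 + 2 - 1) = (xs.length : Int) + 1 := by ring
      rw [h1]; omega
    · have h0 : xs.length = 0 := by omega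
      simp [h0]
  rw [hn]
  apply List.map_congr_left
  intro k _
  simp only [Function.comp]
  rw [PySem.List.slice_toNat _ (by omega) (by omega)]
  have h1 : ((0:Int) + 2 * (k:Int)).toNat = 2 * k := by omega
  have h2 : ((0:Int) + 2 * (k:Int) + 2).toNat = 2 * k + 2 := by omega
  rw [h1, h2]
  norm_num

theorem pvRangeHalf_eq_chunks : ∀ xs : List String,
    (List.range ((xs.length + 1) / 2)).map (fun k => (xs.drop (2 * k)).take 2) = pvChunks xs := by
  apply pvTwoStep
  · simp [pvChunks]
  · intro a; simp [pvChunks, List.range_succ]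
  · intro a b rest ih
    have hlen : ((a :: b :: rest).length + 1) / 2 = ((rest.length + 1) / 2) + 1 := by
      simp; omega
    rw [hlen, List.range_succ_eq_map, List.map_cons, List.map_map]
    simp only [pvChunks]
    congr 1

theorem pvChunks_ne_nil (r : String) (rs : List String) : pvChunks (r :: rs) ≠ [] := by
  cases rs <;> simp [pvChunks]

theorem pvJoinChunks : ∀ xs : List String,
    (PySem.Str.join "," ((pvChunks xs).map (fun c => PySem.Str.join "~" c))).toList
      = (pvPat false xs).tail := by
  apply pvTwoStep
  · simp [pvChunks, PySem.Str.toList_join, PySem.Chars.join_nil, pvPat]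
  · intro a
    simp [pvChunks, PySem.Str.toList_join, PySem.Chars.join_singleton, pvPat]
  · intro a b rest ih
    simp only [pvChunks, List.map_cons]
    cases rest with
    | nil =>
      simp [pvChunks, PySem.Str.toList_join, PySem.Chars.join_singleton,
        PySem.Chars.join_cons_cons, pvPat]
    | cons r rs =>
      obtain ⟨c, cs, hc⟩ := List.exists_cons_of_ne_nil
        (by simpa using pvChunks_ne_nil r rs :
          (pvChunks (r :: rs)).map (fun c => PySem.Str.join "~" c) ≠ [])
      rw [hc]
      rw [PySem.Str.toList_join, List.map_cons, List.map_cons]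
      rw [PySem.Chars.join_cons_cons]
      have ihm : PySem.Chars.join (",".toList)
          (((pvChunks (r :: rs)).map (fun c => PySem.Str.join "~" c)).map String.toList)
          = (pvPat false (r :: rs)).tail := by
        rw [← PySem.Str.toList_join]; exact ih
      rw [hc, List.map_cons] at ihm
      rw [ihm]
      have hpat : pvPat false (a :: b :: r :: rs)
          = ',' :: (a.toList ++ ('~' :: (b.toList ++ (',' :: (pvPat false (r :: rs)).tail)))) := by
        simp [pvPat]
      rw [hpat]
      simp [PySem.Str.toList_join, PySem.Chars.join_cons_cons, PySem.Chars.join_singleton]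

theorem pvBChars (xs : List String) :
    (ConfigurationBoundleString_alt xs).toList = (pvPat false xs).tail := by
  unfold ConfigurationBoundleString_alt
  simp only
  rw [pvChunks_eq, pvRangeHalf_eq_chunks]
  exact pvJoinChunks xs

theorem pv_main (xs : List String) :
    ConfigurationBoundleString xs = ConfigurationBoundleString_alt xs := by
  apply String.ext
  rw [pvAChars, pvBChars]

-- ===== VERDICT (by name: the statement is the Claim_ definition above) =====
theorem ConfigurationBoundleString_spec : Claim_equal_ConfigurationBoundleString := by
  intro xs _
  unfold Spec_ConfigurationBoundleString
  exact pv_main xs
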